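-- pv_equiv track=rewrite | github.com/tattvaedge-ops/ARIS-LIVE | aris_film_director_engine.py | generate_edit_plan
-- ===== SOURCE A (Python) =====
-- def generate_edit_plan(total_scenes):
--
--     transitions = [
--         "fade_in",
--         "crossfade",
--         "zoom_transition",
--         "cut",
--         "crossfade",
--         "fade_out"
--     ]
--
--     plan = []
--
--     for i in range(total_scenes):
--
--         transition = transitions[i % len(transitions)]
--
--         plan.append(transition)
--
--     return plan
-- ===== SOURCE B (Python) =====
-- def generate_edit_plan(total_scenes):
--     transitions = [
--         "fade_in",
--         "crossfade",
--         "zoom_transition",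
--         "cut",
--         "crossfade",
--         "fade_out"
--     ]
--     return (transitions * (total_scenes // len(transitions) + 1))[:total_scenes]
-- ===== Notes on version B (the rewrite author's own statement) =====
-- stated objective: idiomatic
-- what changed: Replaces the explicit loop with per-element modulo indexing by whole-list replication (total_scenes // 6 + 1 copies) followed by a single slice to length total_scenes.
import Mathlib
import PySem

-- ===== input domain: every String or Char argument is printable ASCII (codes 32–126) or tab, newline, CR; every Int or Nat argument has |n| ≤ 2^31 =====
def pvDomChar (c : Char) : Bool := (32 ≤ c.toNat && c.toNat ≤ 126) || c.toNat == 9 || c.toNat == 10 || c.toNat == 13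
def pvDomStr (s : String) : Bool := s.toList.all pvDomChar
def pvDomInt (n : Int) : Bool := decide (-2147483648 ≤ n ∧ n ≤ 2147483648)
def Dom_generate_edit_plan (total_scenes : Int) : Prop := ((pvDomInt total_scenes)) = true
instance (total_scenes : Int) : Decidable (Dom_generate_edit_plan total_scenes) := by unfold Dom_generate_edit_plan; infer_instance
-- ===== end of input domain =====

-- B replaces A's loop with per-element modulo indexing by list replication plus one slice (idiomatic; same O(n) cost).

-- ===== PORT A =====
def pvTransitions : List String :=
  ["fade_in", "crossfade", "zoom_transition", "cut", "crossfade", "fade_out"]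

def generate_edit_plan (total_scenes : Int) : List String :=
  (PySem.List.pyRange 0 total_scenes 1).foldl
    (fun plan i =>
      plan ++ [(PySem.List.pyGet? pvTransitions
                  (PySem.Int.mod i (pvTransitions.length : Int))).getD ""])
    []

-- ===== PORT B =====
def generate_edit_plan_alt (total_scenes : Int) : List String :=
  -- transitions * (total_scenes // len(transitions) + 1), then sliced [:total_scenes]
  PySem.List.slice
    ((List.replicate
        (PySem.Int.floordiv total_scenes (pvTransitions.length : Int) + 1).toNat
        pvTransitions).flatten)
    none (some total_scenes)

-- ===== PRECONDITION & SPEC =====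
def Spec_generate_edit_plan (total_scenes : Int) (out : List String) : Prop := out = generate_edit_plan_alt total_scenes
instance (total_scenes : Int) (out : List String) : Decidable (Spec_generate_edit_plan total_scenes out) := by unfold Spec_generate_edit_plan; infer_instance

-- ===== CLAIM (what is proved, stated in full; the proofs are below) =====
def Claim_equal_generate_edit_plan : Prop := ∀ (total_scenes : Int), Dom_generate_edit_plan total_scenes → Spec_generate_edit_plan total_scenes (generate_edit_plan total_scenes)

-- ===== LEMMAS AND PROOFS =====

-- the per-index function A applies, on the Nat side
def pvF (k : Nat) : String := pvTransitions.getD (k % 6) ""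

theorem pvF_add_six (x : Nat) : pvF (6 + x) = pvF x := by
  simp [pvF, Nat.add_mod_left]

-- core fact: mapping pvF over range (6*q + r) is the first 6*q + r elements of q+1 copies
theorem pv_main (q r : Nat) (hr : r ≤ 6) :
    (List.range (6 * q + r)).map pvF
      = ((List.replicate (q + 1) pvTransitions).flatten).take (6 * q + r) := by
  induction q with
  | zero =>
      interval_cases r <;> rfl
  | succ q ih =>
      have h1 : 6 * (q + 1) + r = 6 + (6 * q + r) := by ring
      rw [h1, List.range_add, List.map_append, List.map_map]
      have h2 : pvF ∘ (fun x => 6 + x) = pvF := by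
        funext x; exact pvF_add_six x
      rw [h2, ih]
      have h3 : (List.replicate (q + 1 + 1) pvTransitions).flatten
          = pvTransitions ++ (List.replicate (q + 1) pvTransitions).flatten := by
        rfl
      rw [h3]
      have h4 : (6 : Nat) = pvTransitions.length := rfl
      rw [show (6 + (6 * q + r)) = pvTransitions.length + (6 * q + r) from by rw [← h4]]
      rw [List.take_append]
      simp only [Nat.add_sub_cancel_left]
      rw [List.take_of_length_le (Nat.le_add_right _ _)]
      congr 1

theorem pv_nat (m : Nat) :
    (List.range m).map pvF
      = ((List.replicate (m / 6 + 1) pvTransitions).flatten).take m := by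
  have h := Nat.div_add_mod m 6
  have := pv_main (m / 6) (m % 6) (le_of_lt (Nat.mod_lt m (by omega)))
  rw [h] at this
  exact this

-- ===== VERDICT (by name: the statement is the Claim_ definition above) =====
theorem generate_edit_plan_spec : Claim_equal_generate_edit_plan := by
  intro n _
  show generate_edit_plan n = generate_edit_plan_alt n
  unfold generate_edit_plan generate_edit_plan_alt
  rw [PySem.List.foldl_append_singleton_eq_map]
  by_cases hn : 0 ≤ n
  · -- nonnegative case: reduce everything to the Nat lemma
    obtain ⟨m, rfl⟩ := Int.eq_ofNat_of_zero_le hn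
    rw [List.nil_append, PySem.List.slice_to _ hn]
    rw [show ((pvTransitions.length : Int)) = ((6 : Nat) : Int) from rfl]
    rw [PySem.Int.floordiv_natCast m 6]
    rw [show (((m / 6 : Nat) : Int) + 1).toNat = m / 6 + 1 from by omega]
    rw [show ((m : Int)).toNat = m from rfl]
    rw [PySem.List.pyRange_zero_nat m, List.map_map]
    have hfun : (fun i => (PySem.List.pyGet? pvTransitions
                  (PySem.Int.mod i ((6 : Nat) : Int))).getD "") ∘ (fun k : Nat => (k : Int))
        = pvF := by
      funext k
      simp only [Function.comp, PySem.Int.mod_natCast, PySem.List.pyGet?_natCast]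
      simp [pvF, List.getD_eq_getElem?_getD]
    rw [hfun, pv_nat]
  · -- negative case: both sides are empty
    rw [not_le] at hn
    rw [PySem.List.pyRange_one_eq_nil (by omega), List.map_nil]
    have hq : PySem.Int.floordiv n (pvTransitions.length : Int) + 1 ≤ 0 := by
      rw [show ((pvTransitions.length : Int)) = 6 from rfl]
      have := (PySem.Int.floordiv_lt_iff_lt_mul (a := n) (b := 6) (q := 0) (by omega)).mpr (by omega)
      omega
    rw [show (PySem.Int.floordiv n (pvTransitions.length : Int) + 1).toNat = 0 from by omega]
    simp [PySem.List.slice, PySem.List.clampIdx]
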